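-- pv_equiv track=rewrite | github.com/davidAlgis/geneanetArchiveScrapper | utils.py | format_string_to_bullets
-- ===== SOURCE A (Python) =====
-- def format_string_to_bullets(s):
--     # Split the string into lines
--     lines = s.strip().split('\n')
--
--     # Initialize an empty list to hold the bullet points
--     bullets = []
--
--     # Iterate over each pair of lines
--     for i in range(0, len(lines), 2):
--         # Get the key and value
--         key = lines[i]
--         value = lines[i + 1] if i + 1 < len(lines) else ''
--
--         # Add the bullet point to the list
--         bullets.append(f'\t- {key} : {value}')
--
--     # Join the bullet points into a single string and return it
--     return '\n'.join(bullets)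
-- ===== SOURCE B (Python) =====
-- def format_string_to_bullets(s):
--     lines = s.strip().split('\n')
--     keys = lines[0::2]
--     values = lines[1::2]
--     values = values + [''] * (len(keys) - len(values))
--     return '\n'.join('\t- %s : %s' % (k, v) for k, v in zip(keys, values))
-- ===== Notes on version B (the rewrite author's own statement) =====
-- stated objective: idiomatic
-- what changed: Replaces the index-stepping loop over range(0, len, 2) with two stride-2 slices (keys and values), pads values to equal length, and zips them into the bullet lines.
import Mathlib
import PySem

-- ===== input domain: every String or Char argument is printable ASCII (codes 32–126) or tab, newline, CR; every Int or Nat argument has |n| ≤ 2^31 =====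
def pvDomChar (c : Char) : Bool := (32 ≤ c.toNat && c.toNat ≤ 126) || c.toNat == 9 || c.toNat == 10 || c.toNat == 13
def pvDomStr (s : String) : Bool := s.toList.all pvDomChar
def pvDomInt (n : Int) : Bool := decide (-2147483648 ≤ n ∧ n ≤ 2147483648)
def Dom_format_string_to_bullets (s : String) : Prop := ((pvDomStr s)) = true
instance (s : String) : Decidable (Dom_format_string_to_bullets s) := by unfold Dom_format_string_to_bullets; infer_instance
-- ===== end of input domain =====

-- B replaces A's index-stepping loop over range(0, len, 2) with two stride-2 slices zipped
-- after padding the value column; objective: idiomatic. Equivalence is proved for all inputs.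

-- ===== PORT A =====
-- the loop 'for i in range(0, len(lines), 2): bullets.append(...)' of A
def pvBulletsA (lines : List String) : List String :=
  (PySem.List.pyRange 0 (PySem.List.len lines) 2).foldl
    (fun bullets i =>
      let key := PySem.List.pyGetD lines i ""
      let value := if i + 1 < PySem.List.len lines then PySem.List.pyGetD lines (i + 1) "" else ""
      bullets ++ ["\t- " ++ key ++ " : " ++ value]) []

def format_string_to_bullets (s : String) : String :=
  let lines := (PySem.Str.split? (PySem.Str.strip s) "\n").getD []
  PySem.Str.join "\n" (pvBulletsA lines)

-- ===== PORT B =====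
-- keys = lines[0::2]; values = lines[1::2] padded with '' to keys' length; zip and format
def pvBulletsB (lines : List String) : List String :=
  let keys := (PySem.List.slice? lines (some 0) none 2).getD []
  let values := (PySem.List.slice? lines (some 1) none 2).getD []
  let values2 := values ++ List.replicate (keys.length - values.length) ""
  (keys.zip values2).map (fun kv => "\t- " ++ kv.1 ++ " : " ++ kv.2)

def format_string_to_bullets_alt (s : String) : String :=
  let lines := (PySem.Str.split? (PySem.Str.strip s) "\n").getD []
  PySem.Str.join "\n" (pvBulletsB lines)

-- ===== PRECONDITION & SPEC =====
def Spec_format_string_to_bullets (s : String) (out : String) : Prop := out = format_string_to_bullets_alt s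
instance (s : String) (out : String) : Decidable (Spec_format_string_to_bullets s out) := by unfold Spec_format_string_to_bullets; infer_instance

-- ===== CLAIM (what is proved, stated in full; the proofs are below) =====
def Claim_equal_format_string_to_bullets : Prop := ∀ (s : String), Dom_format_string_to_bullets s → Spec_format_string_to_bullets s (format_string_to_bullets s)

-- ===== LEMMAS AND PROOFS =====

-- A's bullets in map-over-range normal form
theorem pvBulletsA_eq_map (L : List String) :
    pvBulletsA L = (List.range ((L.length + 1) / 2)).map (fun k =>
      "\t- " ++ L.getD (2 * k) "" ++ " : " ++
        (if 2 * k + 1 < L.length then L.getD (2 * k + 1) "" else "")) := by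
  unfold pvBulletsA
  rw [PySem.List.foldl_append_singleton_eq_map]
  rw [PySem.List.pyRange_of_pos 0 (PySem.List.len L) (by norm_num : (0:Int) < 2)]
  rw [List.map_map]
  have hcnt : (if (0:Int) < PySem.List.len L then (((PySem.List.len L) - 0 + 2 - 1) / 2).toNat else 0)
      = (L.length + 1) / 2 := by
    simp only [PySem.List.len_eq]
    split_ifs with h
    · omega
    · omega
  rw [hcnt]
  apply List.map_congr_left
  intro k _
  simp only [Function.comp, PySem.List.len_eq]
  have h1 : (0 : Int) + 2 * (k : Int) = ((2 * k : Nat) : Int) := by push_cast; ring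
  rw [h1, PySem.List.pyGetD_natCast]
  have h2 : ((2 * k : Nat) : Int) + 1 = ((2 * k + 1 : Nat) : Int) := by push_cast; ring
  rw [h2, PySem.List.pyGetD_natCast]
  have h3 : (((2 * k + 1 : Nat) : Int) < (L.length : Int)) ↔ 2 * k + 1 < L.length := by
    exact_mod_cast Iff.rfl
  simp only [h3]

-- a stride-2 slice starting at a, for a = 0 or 1, in map-over-range normal form
theorem pvSlice2_eq_map (L : List String) (a : Nat) (ha : a ≤ 1) :
    (PySem.List.slice? L (some (a : Int)) none 2).getD []
      = (List.range ((L.length + 1 - a) / 2)).map (fun k => L.getD (2 * k + a) "") := by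
  unfold PySem.List.slice? PySem.List.sliceIndices
  norm_num
  have hstart : (if (a : Int) < 0 then max ((a : Int) + (L.length : Int)) 0 else min (a : Int) (L.length : Int))
      = min (a : Int) (L.length : Int) := by
    split_ifs with h
    · omega
    · rfl
  rw [hstart]
  set st : Int := min (a : Int) (L.length : Int) with hst
  have hcnt : (if st < (L.length : Int) then (((L.length : Int) - st + 2 - 1) / 2).toNat else 0)
      = (L.length + 1 - a) / 2 := by
    by_cases hle : a ≤ L.length
    · have : st = (a : Int) := by omega
      rw [this]
      split_ifs with h
      · omega
      · omega
    · have h0 : a = 1 ∧ L.length = 0 := by omega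
      obtain ⟨h1, h2⟩ := h0
      subst h1
      have : st = (L.length : Int) := by omega
      rw [this]
      simp [h2]
  rw [hcnt]
  rw [List.filterMap_congr (g := fun k => some (L.getD (2 * k + a) ""))]
  · rw [show (fun k => some (L.getD (2 * k + a) "")) = some ∘ (fun k => L.getD (2 * k + a) "") from rfl,
      List.filterMap_eq_map]
    simp [List.getD]
  · intro k hk
    simp only [List.mem_range] at hk
    have hlt : 2 * k + a < L.length := by omega
    have hidx : (st + 2 * (k : Int)).toNat = 2 * k + a := by
      have : st = (a : Int) := by omega
      omega
    rw [hidx]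
    rw [List.getElem?_eq_getElem hlt]
    rw [List.getD_eq_getElem L "" hlt]

theorem pvSlice0_eq_map (L : List String) :
    (PySem.List.slice? L (some 0) none 2).getD []
      = (List.range ((L.length + 1) / 2)).map (fun k => L.getD (2 * k) "") := by
  have h := pvSlice2_eq_map L 0 (by omega)
  simpa using h

theorem pvSlice1_eq_map (L : List String) :
    (PySem.List.slice? L (some 1) none 2).getD []
      = (List.range (L.length / 2)).map (fun k => L.getD (2 * k + 1) "") := by
  have h := pvSlice2_eq_map L 1 (by omega)
  have harith : (L.length + 1 - 1) / 2 = L.length / 2 := by omega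
  rw [harith] at h
  simpa using h

-- the two bullet builders agree on every list of lines
theorem pvBullets_eq (L : List String) : pvBulletsA L = pvBulletsB L := by
  rw [pvBulletsA_eq_map]
  simp only [pvBulletsB]
  rw [pvSlice0_eq_map, pvSlice1_eq_map]
  apply List.ext_getElem
  · simp only [List.length_map, List.length_range, List.length_zip, List.length_append,
      List.length_replicate]
    omega
  · intro k hk1 hk2
    simp only [List.length_map, List.length_range] at hk1
    simp only [List.getElem_map, List.getElem_range, List.getElem_zip]
    by_cases hv : k < L.length / 2
    · have hlt : 2 * k + 1 < L.length := by omega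
      rw [List.getElem_append_left (by simp only [List.length_map, List.length_range]; omega)]
      simp [hlt]
    · have hnlt : ¬ (2 * k + 1 < L.length) := by omega
      rw [List.getElem_append_right (by simp only [List.length_map, List.length_range]; omega)]
      simp [hnlt]

-- ===== VERDICT (by name: the statement is the Claim_ definition above) =====
theorem format_string_to_bullets_spec : Claim_equal_format_string_to_bullets := by
  intro s _
  unfold Spec_format_string_to_bullets
  simp only [format_string_to_bullets, format_string_to_bullets_alt]
  rw [pvBullets_eq]
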